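-- pv_equiv track=rewrite | github.com/Luolingwei/LeetCode | OA/Amazon/QAmazon_Count number of substrings with exactly k distinct characters.py | count
-- ===== SOURCE A (Python) =====
-- def count(S,k):
--     left,N=0,len(S)
--     memo,ans={},set()
--     for i,c in enumerate(S):
--         if c in memo and memo[c]>=left:
--             left=memo[c]+1
--         memo[c]=i
--         if i-left+1==k:
--             ans.add(S[left:i+1])
--             left+=1
--     return list(ans)
-- ===== SOURCE B (Python) =====
-- def count(S, k):
--     if k <= 0 or k > len(set(S)):
--         return []
--     seen = set()
--     res = []
--     for i in range(len(S) - k + 1):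
--         sub = S[i:i+k]
--         if len(set(sub)) == k and sub not in seen:
--             seen.add(sub)
--             res.append(sub)
--     return res
-- ===== Notes on version B (the rewrite author's own statement) =====
-- stated objective: simpler
-- what changed: Replaces A's stateful sliding window (last-seen-index dict plus moving left pointer) by an independent per-window distinctness check — for every start index take the length-k slice and keep it when its character set has size k, deduplicating with a seen-set in first-occurrence order — after a quick rejection when k exceeds the number of distinct characters of S (no such window can exist).
import Mathlib
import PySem

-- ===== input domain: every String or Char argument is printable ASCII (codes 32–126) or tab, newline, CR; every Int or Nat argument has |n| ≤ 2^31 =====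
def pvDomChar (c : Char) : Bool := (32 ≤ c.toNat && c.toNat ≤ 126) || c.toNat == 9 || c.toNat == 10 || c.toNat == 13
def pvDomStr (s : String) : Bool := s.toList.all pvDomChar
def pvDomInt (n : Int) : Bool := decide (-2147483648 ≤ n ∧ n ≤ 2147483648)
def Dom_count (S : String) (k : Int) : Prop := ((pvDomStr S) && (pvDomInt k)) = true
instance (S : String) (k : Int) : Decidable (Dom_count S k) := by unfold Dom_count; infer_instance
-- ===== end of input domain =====

-- B replaces A's stateful sliding window by an independent per-window distinctness check, with a
-- quick rejection when k exceeds the number of distinct characters of S (simpler structure);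
-- A's `list(ans)` over a Python set is ported as insertion order (the PySem model of set).

-- ===== PORT A =====
-- loop body of A's for-loop (state: left, memo, ans)
def astep (S : String) (k : Int) (st : Int × PySem.Dict Char Int × PySem.Set String)
    (ic : Int × Char) : Int × PySem.Dict Char Int × PySem.Set String :=
  let left := st.1
  let memo := st.2.1
  let ans := st.2.2
  let i := ic.1
  let c := ic.2
  let left :=
    match memo.get? c with          -- if c in memo and memo[c] >= left: left = memo[c]+1
    | some m => if m ≥ left then m + 1 else left
    | none => left
  let memo := memo.insert c i       -- memo[c] = i
  if i - left + 1 == k then         -- if i-left+1 == k: ans.add(S[left:i+1]); left += 1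
    (left + 1, memo, PySem.Set.add ans (PySem.Str.slice S (some left) (some (i + 1))))
  else
    (left, memo, ans)

def count (S : String) (k : Int) : List String :=
  ((PySem.List.enumerate S.toList 0).foldl (astep S k)
      (0, PySem.Dict.empty, PySem.Set.empty)).2.2

-- ===== PORT B =====
-- loop body of B's for-loop over start indices (state: seen set, result list)
def bstep2 (S : String) (k : Int) (st : PySem.Set String × List String) (i : Int) :
    PySem.Set String × List String :=
  let sub := PySem.Str.slice S (some i) (some (i + k))
  if (PySem.Set.len (PySem.Set.ofList sub.toList) == k) && !(PySem.Set.contains st.1 sub) then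
    (PySem.Set.add st.1 sub, st.2 ++ [sub])
  else
    st

def count_alt (S : String) (k : Int) : List String :=
  if k ≤ 0 ∨ PySem.Set.len (PySem.Set.ofList S.toList) < k then []
  else
    ((PySem.List.pyRange 0 ((S.toList.length : Int) - k + 1) 1).foldl (bstep2 S k)
      (PySem.Set.empty, [])).2

-- ===== PRECONDITION & SPEC =====
def Spec_count (S : String) (k : Int) (out : List String) : Prop := out = count_alt S k
instance (S : String) (k : Int) (out : List String) : Decidable (Spec_count S k out) := by unfold Spec_count; infer_instance

-- ===== CLAIM (what is proved, stated in full; the proofs are below) =====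
def Claim_equal_count : Prop := ∀ (S : String) (k : Int), Dom_count S k → Spec_count S k (count S k)

-- ===== LEMMAS AND PROOFS =====

-- index of the LAST occurrence of c in p (none if absent)
def lastOcc : List Char → Char → Option Nat
  | [], _ => none
  | d :: p, c =>
    match lastOcc p c with
    | some m => some (m + 1)
    | none => if d = c then some 0 else none

-- 1 + last occurrence of c in p (0 if absent)
def bump (p : List Char) (c : Char) : Nat :=
  match lastOcc p c with
  | some m => m + 1
  | none => 0

def loRev : List Char → Nat
  | [] => 0
  | c :: q => max (loRev q) (bump q.reverse c)

-- smallest start of an all-distinct suffix of p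
def lo (p : List Char) : Nat := loRev p.reverse

-- expected value of A's `left` after processing prefix p
def leftSpec (p : List Char) (k : Int) : Int :=
  if 1 ≤ k then max (lo p : Int) ((p.length : Int) - k + 1) else (lo p : Int)

-- the distinct-character windows of length k, in order of end index (with duplicates)
def wins (cs : List Char) (k : Int) : List String :=
  (List.range cs.length).filterMap (fun i =>
    if 1 ≤ k ∧ (lo (cs.take (i + 1)) : Int) ≤ (i : Int) + 1 - k then
      some (String.ofList ((cs.take (i + 1)).drop (i + 1 - k.toNat)))
    else none)

theorem lastOcc_snoc (p : List Char) (d c : Char) :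
    lastOcc (p ++ [d]) c = if d = c then some p.length else lastOcc p c := by
  induction p with
  | nil => by_cases hd : d = c <;> simp [lastOcc, hd]
  | cons e p ih =>
    simp only [List.cons_append, lastOcc]
    rw [ih]
    by_cases hd : d = c
    · simp [hd]
    · simp [hd]

theorem lastOcc_lt (p : List Char) (c : Char) (m : Nat) (h : lastOcc p c = some m) :
    m < p.length := by
  induction p generalizing m with
  | nil => simp [lastOcc] at h
  | cons d p ih =>
    cases hl : lastOcc p c with
    | some a =>
      simp only [lastOcc, hl, Option.some.injEq] at h
      have := ih a hl
      simp only [List.length_cons]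
      omega
    | none =>
      simp only [lastOcc, hl] at h
      by_cases hd : d = c
      · simp [hd] at h; simp [← h]
      · simp [hd] at h

theorem bump_le (p : List Char) (c : Char) : bump p c ≤ p.length := by
  unfold bump
  cases hl : lastOcc p c with
  | some a => simp only [hl]; have := lastOcc_lt p c a hl; omega
  | none => simp [hl]

theorem lo_nil : lo ([] : List Char) = 0 := rfl

theorem lo_snoc (p : List Char) (c : Char) : lo (p ++ [c]) = max (lo p) (bump p c) := by
  simp [lo, loRev, List.reverse_append, List.reverse_reverse]

theorem lo_le_length (p : List Char) : lo p ≤ p.length := by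
  induction p using List.reverseRecOn with
  | nil => simp [lo_nil]
  | append_singleton p c ih =>
    rw [lo_snoc]
    have := bump_le p c
    simp only [List.length_append, List.length_singleton]
    omega

theorem mem_drop_iff_lastOcc (p : List Char) (c : Char) (j : Nat) :
    c ∈ p.drop j ↔ ∃ m, lastOcc p c = some m ∧ j ≤ m := by
  induction p generalizing j with
  | nil => simp [lastOcc]
  | cons d p ih =>
    cases j with
    | zero =>
      cases hl : lastOcc p c with
      | some a =>
        have hmem : c ∈ p := by
          have := (ih 0).mpr ⟨a, hl, Nat.zero_le a⟩
          simpa using this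
        simp [lastOcc, hl, hmem]
      | none =>
        by_cases hd : d = c
        · simp [lastOcc, hl, hd]
        · have hnm : c ∉ p := by
            intro hc
            rcases (ih 0).mp (by simpa using hc) with ⟨m, hm, _⟩
            simp [hl] at hm
          simp [lastOcc, hl, hd, hnm, Ne.symm hd]
    | succ j' =>
      have hdrop : (d :: p).drop (j' + 1) = p.drop j' := rfl
      rw [hdrop, ih j']
      cases hl : lastOcc p c with
      | some a =>
        simp only [lastOcc, hl]
        constructor
        · rintro ⟨m, hm, hjm⟩
          simp only [Option.some.injEq] at hm
          exact ⟨a + 1, rfl, by omega⟩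
        · rintro ⟨m, hm, hjm⟩
          simp only [Option.some.injEq] at hm
          exact ⟨a, rfl, by omega⟩
      | none =>
        simp only [lastOcc, hl]
        constructor
        · rintro ⟨m, hm, _⟩; simp at hm
        · rintro ⟨m, hm, hjm⟩
          by_cases hd : d = c
          · simp [hd] at hm; omega
          · simp [hd] at hm

theorem nodup_drop_iff (p : List Char) (j : Nat) (hj : j ≤ p.length) :
    (p.drop j).Nodup ↔ lo p ≤ j := by
  induction p using List.reverseRecOn generalizing j with
  | nil => simp [lo_nil]
  | append_singleton p c ih =>
    rw [lo_snoc]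
    rcases Nat.lt_or_ge j (p.length + 1) with h | h
    · have hj' : j ≤ p.length := by omega
      rw [List.drop_append_of_le_length hj']
      have hnotin : c ∉ p.drop j ↔ bump p c ≤ j := by
        have hmem := mem_drop_iff_lastOcc p c j
        unfold bump
        cases hl : lastOcc p c with
        | some a =>
          simp only [hl] at hmem
          have hiff : (∃ m, some a = some m ∧ j ≤ m) ↔ j ≤ a := by
            constructor
            · rintro ⟨m, hm, hjm⟩; simp only [Option.some.injEq] at hm; omega
            · intro hja; exact ⟨a, rfl, hja⟩
          rw [hmem, hiff]
          simp only [hl]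
          omega
        | none =>
          simp only [hl] at hmem
          simp [hmem]
      constructor
      · intro hnd
        rw [List.nodup_append] at hnd
        have h1 := (ih j hj').mp hnd.1
        have h2 : c ∉ p.drop j := fun hc => hnd.2.2 c hc c (by simp) rfl
        have := hnotin.mp h2
        omega
      · intro hle
        rw [List.nodup_append]
        refine ⟨(ih j hj').mpr (by omega), List.nodup_singleton c, ?_⟩
        intro x hx b hb
        simp only [List.mem_singleton] at hb
        subst hb
        intro hxc
        subst hxc
        exact (hnotin.mpr (by omega)) hx
    · have hj2 : j = p.length + 1 := by
        simp only [List.length_append, List.length_singleton] at hj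
        omega
      subst hj2
      have hd : (p ++ [c]).drop (p.length + 1) = [] := by
        apply List.drop_eq_nil_of_le
        simp
      rw [hd]
      have h1 := lo_le_length p
      have h2 := bump_le p c
      simp only [List.nodup_nil, true_iff]
      omega

-- proof-side view of B's loop body acting on the result list alone
def bstep (S : String) (k : Int) (res : List String) (i : Int) : List String :=
  let sub := PySem.Str.slice S (some i) (some (i + k))
  if (PySem.Set.len (PySem.Set.ofList sub.toList) == k) && !(res.contains sub) then
    res ++ [sub]
  else
    res

theorem bstep2_pair (S : String) (k : Int) (l : List Int) : ∀ (r : List String),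
    l.foldl (bstep2 S k) (r, r) = (l.foldl (bstep S k) r, l.foldl (bstep S k) r) := by
  induction l with
  | nil => intro r; rfl
  | cons i l ih =>
    intro r
    have hstep : bstep2 S k (r, r) i = (bstep S k r i, bstep S k r i) := by
      simp only [bstep2, bstep, PySem.Set.contains]
      set sub := PySem.Str.slice S (some i) (some (i + k)) with hsub
      set b : Bool := (PySem.Set.len (PySem.Set.ofList sub.toList) == k) && !(r.contains sub)
        with hb
      by_cases hbv : b = true
      · rw [if_pos hbv]
        have hnc : r.contains sub = false := by
          rcases Bool.and_eq_true_iff.mp (hb ▸ hbv) with ⟨-, h2⟩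
          simpa using h2
        have hnm : sub ∉ r := by simpa using hnc
        simp [PySem.Set.add, PySem.Set.contains, hnm, hbv]
      · simp [hbv]
    rw [List.foldl_cons, List.foldl_cons, hstep, ih]

theorem foldl_add_if_set {α β : Type} [BEq β] (P : α → Prop) [DecidablePred P] (f : α → β)
    (l : List α) (s : List β) :
    l.foldl (fun r x => if P x then PySem.Set.add r (f x) else r) s
      = PySem.Set.update s (l.filterMap fun x => if P x then some (f x) else none) := by
  induction l generalizing s with
  | nil => simp [PySem.Set.update_nil]
  | cons x l ih =>
    by_cases hP : P x
    · simp only [List.foldl_cons, List.filterMap_cons, if_pos hP, PySem.Set.update_cons]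
      exact ih _
    · simp only [List.foldl_cons, List.filterMap_cons, if_neg hP]
      exact ih s

theorem ofList_length_iff {β : Type} [BEq β] [LawfulBEq β] (l : List β) :
    (PySem.Set.ofList l).length = l.length ↔ l.Nodup := by
  induction l using List.reverseRecOn with
  | nil => simp [PySem.Set.ofList]
  | append_singleton l x ih =>
    rw [PySem.Set.ofList_append_singleton]
    have hle := PySem.Set.length_ofList_le l
    unfold PySem.Set.add
    by_cases hc : (PySem.Set.ofList l).contains x = true
    · have hx : x ∈ l := by
        rw [← PySem.Set.mem_ofList l x]
        simpa [PySem.Set.contains] using hc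
      rw [if_pos hc]
      constructor
      · intro hlen
        simp only [List.length_append, List.length_singleton] at hlen
        omega
      · intro hnd
        exact absurd hx ((List.nodup_append.mp hnd).2.2 x · x (by simp) rfl)
    · have hx : x ∉ l := by
        rw [← PySem.Set.mem_ofList l x]
        intro hmem
        exact hc (by simpa [PySem.Set.contains] using hmem)
      rw [if_neg hc]
      simp only [List.length_append, List.length_singleton]
      rw [List.nodup_append]
      constructor
      · intro hlen
        exact ⟨ih.mp (by omega), List.nodup_singleton x,
          fun a ha b hb hab => hx (by simp at hb; exact hb ▸ hab ▸ ha)⟩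
      · rintro ⟨hnd, -, -⟩
        have := ih.mpr hnd
        omega

theorem wins_nil_of_nonpos (cs : List Char) (k : Int) (hk : k ≤ 0) : wins cs k = [] := by
  rw [wins, List.filterMap_eq_nil_iff]
  intro i _
  rw [if_neg]
  rintro ⟨h1, -⟩
  omega

theorem wins_eq_bwins (cs : List Char) (K : Nat) (hK : 1 ≤ K) :
    wins cs (K : Int) = (List.range (cs.length + 1 - K)).filterMap
      (fun j => if ((cs.drop j).take K).Nodup then
          some (String.ofList ((cs.drop j).take K)) else none) := by
  by_cases hKL : K ≤ cs.length
  · have hsplit : List.range cs.length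
        = List.range (K - 1) ++ (List.range (cs.length + 1 - K)).map (fun j => K - 1 + j) := by
      conv_lhs => rw [show cs.length = (K - 1) + (cs.length + 1 - K) from by omega]
      rw [List.range_add]
    rw [wins, hsplit, List.filterMap_append]
    have h1 : (List.range (K - 1)).filterMap (fun i =>
        if 1 ≤ (K : Int) ∧ (lo (cs.take (i + 1)) : Int) ≤ (i : Int) + 1 - (K : Int) then
          some (String.ofList ((cs.take (i + 1)).drop (i + 1 - (K : Int).toNat)))
        else none) = [] := by
      rw [List.filterMap_eq_nil_iff]
      intro i hi
      have hi' : i < K - 1 := List.mem_range.mp hi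
      rw [if_neg]
      rintro ⟨-, hlo⟩
      have h0 : (0 : Int) ≤ (lo (cs.take (i + 1)) : Int) := Int.natCast_nonneg _
      omega
    rw [h1, List.nil_append, List.filterMap_map]
    apply List.filterMap_congr
    intro j hj
    have hj' : j < cs.length + 1 - K := List.mem_range.mp hj
    have hjK : j + K ≤ cs.length := by omega
    simp only [Function.comp_apply]
    have hi1 : K - 1 + j + 1 = j + K := by omega
    have hp : (cs.take (j + K)).length = j + K := by
      rw [List.length_take]
      omega
    have hdt : (cs.take (j + K)).drop j = (cs.drop j).take K := by
      rw [List.drop_take]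
      congr 1
      omega
    have hno : ((cs.drop j).take K).Nodup ↔ lo (cs.take (j + K)) ≤ j := by
      rw [← hdt]
      exact nodup_drop_iff (cs.take (j + K)) j (by omega)
    have hsub : (cs.take (K - 1 + j + 1)).drop (K - 1 + j + 1 - (K : Int).toNat)
        = (cs.drop j).take K := by
      rw [hi1, Int.toNat_natCast, ← hdt]
      congr 1
      omega
    by_cases hcond : lo (cs.take (j + K)) ≤ j
    · rw [if_pos, if_pos (hno.mpr hcond), hsub]
      refine ⟨by exact_mod_cast hK, ?_⟩
      rw [hi1]
      push_cast
      omega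
    · rw [if_neg, if_neg (fun hnd => hcond (hno.mp hnd))]
      rintro ⟨-, hlo⟩
      rw [hi1] at hlo
      push_cast at hlo
      omega
  · have hz : cs.length + 1 - K = 0 := by omega
    rw [hz]
    simp only [List.range_zero, List.filterMap_nil]
    rw [wins, List.filterMap_eq_nil_iff]
    intro i hi
    have hi' : i < cs.length := List.mem_range.mp hi
    rw [if_neg]
    rintro ⟨-, hlo⟩
    have h0 : (0 : Int) ≤ (lo (cs.take (i + 1)) : Int) := Int.natCast_nonneg _
    omega

theorem leftSpec_nonneg (p : List Char) (k : Int) : 0 ≤ leftSpec p k := by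
  rw [leftSpec]
  split
  · exact le_trans (Int.natCast_nonneg _) (le_max_left _ _)
  · exact Int.natCast_nonneg _

theorem wins_snoc (p : List Char) (c : Char) (k : Int) :
    wins (p ++ [c]) k =
      wins p k ++ (if 1 ≤ k ∧ (lo (p ++ [c]) : Int) ≤ (p.length : Int) + 1 - k then
        [String.ofList ((p ++ [c]).drop (p.length + 1 - k.toNat))] else []) := by
  rw [wins, wins]
  rw [List.length_append, List.length_singleton, List.range_succ, List.filterMap_append]
  congr 1
  · apply List.filterMap_congr
    intro i hi
    have hi' : i < p.length := List.mem_range.mp hi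
    rw [List.take_append_of_le_length (by omega)]
  · have htake : (p ++ [c]).take (p.length + 1) = p ++ [c] := by
      rw [show p.length + 1 = (p ++ [c]).length from by simp, List.take_length]
    simp only [List.filterMap_cons, List.filterMap_nil, htake]
    split_ifs with h
    · rfl
    · rfl

theorem astep_spec (S : String) (k : Int) (st : Int × PySem.Dict Char Int × PySem.Set String)
    (p : List Char) (c : Char) (hp : (p ++ [c]) <+: S.toList)
    (hL : st.1 = leftSpec p k)
    (hMem : ∀ x, st.2.1.get? x = (lastOcc p x).map (Nat.cast : Nat → Int))
    (hAns : st.2.2 = PySem.Set.ofList (wins p k)) :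
    (astep S k st ((p.length : Int), c)).1 = leftSpec (p ++ [c]) k
    ∧ (∀ x, (astep S k st ((p.length : Int), c)).2.1.get? x
        = (lastOcc (p ++ [c]) x).map (Nat.cast : Nat → Int))
    ∧ (astep S k st ((p.length : Int), c)).2.2 = PySem.Set.ofList (wins (p ++ [c]) k) := by
  have hmemo : ∀ x, (st.2.1.insert c ((p.length : Int))).get? x
      = (lastOcc (p ++ [c]) x).map (Nat.cast : Nat → Int) := by
    intro x
    by_cases hx : x = c
    · subst hx
      rw [PySem.Dict.get?_insert_self, lastOcc_snoc, if_pos rfl, Option.map_some]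
    · rw [PySem.Dict.get?_insert_of_ne _ _ hx, hMem x, lastOcc_snoc,
        if_neg (fun h => hx h.symm)]
  have hmatch_eq : astep S k st ((p.length : Int), c)
      = if (((p.length : Int) - (max (leftSpec p k) ((bump p c : Nat) : Int)) + 1 == k)) = true
          then ((max (leftSpec p k) ((bump p c : Nat) : Int)) + 1,
                st.2.1.insert c ((p.length : Int)),
                PySem.Set.add st.2.2
                  (PySem.Str.slice S (some (max (leftSpec p k) ((bump p c : Nat) : Int)))
                    (some ((p.length : Int) + 1))))
          else ((max (leftSpec p k) ((bump p c : Nat) : Int)),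
                st.2.1.insert c ((p.length : Int)), st.2.2) := by
    simp only [astep, hL]
    rw [hMem c]
    cases hlast : lastOcc p c with
    | none =>
      simp only [bump, hlast, Option.map_none, Option.bind_none, Nat.cast_zero]
      rw [max_eq_left (leftSpec_nonneg p k)]
    | some m =>
      simp only [bump, hlast, Option.map_some]
      by_cases hm : (m : Int) ≥ leftSpec p k
      · simp only [if_pos hm]
        rw [max_eq_right (by omega)]
        push_cast
        rfl
      · simp only [if_neg hm]
        rw [max_eq_left (by push_cast; omega)]
  rw [hmatch_eq]
  set A := max (leftSpec p k) ((bump p c : Nat) : Int) with hAdef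
  have hlo0 : (0 : Int) ≤ (lo (p ++ [c]) : Int) := Int.natCast_nonneg _
  have hA2 : A = if 1 ≤ k then max (lo (p ++ [c]) : Int) ((p.length : Int) - k + 1)
      else (lo (p ++ [c]) : Int) := by
    rw [hAdef, leftSpec, lo_snoc]
    push_cast [Nat.cast_max]
    split_ifs with h1 <;> omega
  by_cases h1 : 1 ≤ k
  · by_cases hfire : (lo (p ++ [c]) : Int) ≤ (p.length : Int) + 1 - k
    · have hcondT : (((p.length : Int) - A + 1 == k)) = true := by
        rw [beq_iff_eq, hA2, if_pos h1]
        omega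
      rw [if_pos hcondT]
      have hKle : k.toNat ≤ p.length + 1 := by omega
      have hAval : A = ((p.length + 1 - k.toNat : Nat) : Int) := by
        rw [hA2, if_pos h1, Nat.cast_sub hKle]
        push_cast
        omega
      obtain ⟨q, hq⟩ := hp
      have hw : (PySem.Str.slice S (some A) (some ((p.length : Int) + 1))).toList
          = (p ++ [c]).drop (p.length + 1 - k.toNat) := by
        rw [PySem.Str.toList_slice, PySem.Chars.slice_eq_listSlice, hAval,
          show ((p.length : Int) + 1) = ((p.length + 1 : Nat) : Int) by push_cast; ring,
          PySem.List.slice_natCast, ← hq,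
          List.drop_append_of_le_length (by simp; try omega),
          List.take_left' (by simp [List.length_drop]; try omega)]
      have hwS : PySem.Str.slice S (some A) (some ((p.length : Int) + 1))
          = String.ofList ((p ++ [c]).drop (p.length + 1 - k.toNat)) := by
        rw [← hw, String.ofList_toList]
      refine ⟨?_, hmemo, ?_⟩
      · show A + 1 = leftSpec (p ++ [c]) k
        rw [hA2, if_pos h1, leftSpec, if_pos h1]
        simp only [List.length_append, List.length_singleton]
        push_cast
        omega
      · show PySem.Set.add st.2.2 _ = _
        rw [wins_snoc, if_pos ⟨h1, hfire⟩, PySem.Set.ofList_append_singleton, hAns, hwS]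
    · have hcondF : ¬ ((((p.length : Int) - A + 1 == k)) = true) := by
        rw [beq_iff_eq, hA2, if_pos h1]
        omega
      rw [if_neg hcondF]
      refine ⟨?_, hmemo, ?_⟩
      · show A = leftSpec (p ++ [c]) k
        rw [hA2, if_pos h1, leftSpec, if_pos h1]
        simp only [List.length_append, List.length_singleton]
        push_cast
        omega
      · show st.2.2 = _
        rw [wins_snoc, if_neg (fun h => hfire h.2), List.append_nil, hAns]
  · have hloLe : (lo (p ++ [c]) : Int) ≤ (p.length : Int) := by
      rw [lo_snoc]
      have h2 := lo_le_length p
      have h3 := bump_le p c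
      push_cast [Nat.cast_max]
      omega
    have hcondF : ¬ ((((p.length : Int) - A + 1 == k)) = true) := by
      rw [beq_iff_eq, hA2, if_neg h1]
      omega
    rw [if_neg hcondF]
    refine ⟨?_, hmemo, ?_⟩
    · show A = leftSpec (p ++ [c]) k
      rw [hA2, if_neg h1, leftSpec, if_neg h1]
    · show st.2.2 = _
      rw [wins_snoc, if_neg (fun h => h1 h.1), List.append_nil, hAns]

theorem count_eq_wins (S : String) (k : Int) :
    count S k = PySem.Set.ofList (wins S.toList k) := by
  have hinv : ∀ (p : List Char), p <+: S.toList →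
      ((PySem.List.enumerate p 0).foldl (astep S k) (0, PySem.Dict.empty, PySem.Set.empty)).1
          = leftSpec p k
      ∧ (∀ x, ((PySem.List.enumerate p 0).foldl (astep S k)
            (0, PySem.Dict.empty, PySem.Set.empty)).2.1.get? x
          = (lastOcc p x).map (Nat.cast : Nat → Int))
      ∧ ((PySem.List.enumerate p 0).foldl (astep S k)
            (0, PySem.Dict.empty, PySem.Set.empty)).2.2
          = PySem.Set.ofList (wins p k) := by
    intro p
    induction p using List.reverseRecOn with
    | nil =>
      intro _
      refine ⟨?_, ?_, ?_⟩
      · show (0 : Int) = leftSpec [] k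
        rw [leftSpec, lo_nil]
        split
        · simp only [List.length_nil, Nat.cast_zero]
          omega
        · simp
      · intro x
        show PySem.Dict.empty.get? x = _
        simp [PySem.Dict.get?_empty, lastOcc]
      · show PySem.Set.empty = _
        rw [wins]
        simp [PySem.Set.empty, PySem.Set.ofList_nil]
    | append_singleton p c ih =>
      intro hp
      have hp' : p <+: S.toList := (List.prefix_append p [c]).trans hp
      obtain ⟨hL, hMem, hAns⟩ := ih hp'
      have henum : PySem.List.enumerate (p ++ [c]) 0
          = PySem.List.enumerate p 0 ++ [((p.length : Int), c)] := by
        rw [PySem.List.enumerate_append]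
        simp [PySem.List.enumerate]
      rw [henum, List.foldl_append, List.foldl_cons, List.foldl_nil]
      exact astep_spec S k _ p c hp hL hMem hAns
  unfold count
  exact (hinv S.toList (List.prefix_refl _)).2.2

theorem wins_nil_of_big (cs : List Char) (k : Int) (hk : 1 ≤ k)
    (hbig : ((PySem.Set.ofList cs).length : Int) < k) : wins cs k = [] := by
  rw [wins, List.filterMap_eq_nil_iff]
  intro i hi
  have hi' : i < cs.length := List.mem_range.mp hi
  rw [if_neg]
  rintro ⟨h1, hlo⟩
  set K := k.toNat with hKdef
  have hK : k = (K : Int) := by omega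
  have h0 : (0 : Int) ≤ (lo (cs.take (i + 1)) : Int) := Int.natCast_nonneg _
  have hKi : K ≤ i + 1 := by omega
  have hlo' : lo (cs.take (i + 1)) ≤ i + 1 - K := by omega
  have hlen : (cs.take (i + 1)).length = i + 1 := by
    rw [List.length_take]
    omega
  have hnd : ((cs.take (i + 1)).drop (i + 1 - K)).Nodup :=
    (nodup_drop_iff _ _ (by omega)).mpr hlo'
  have hwl : ((cs.take (i + 1)).drop (i + 1 - K)).length = K := by
    rw [List.length_drop]
    omega
  have hcard : K ≤ (PySem.Set.ofList cs).length := by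
    have h1 : ((cs.take (i + 1)).drop (i + 1 - K)).toFinset.card = K := by
      rw [List.toFinset_card_of_nodup hnd, hwl]
    have h2 : ((cs.take (i + 1)).drop (i + 1 - K)).toFinset ⊆ cs.toFinset := by
      intro x hx
      rw [List.mem_toFinset] at hx ⊢
      exact List.mem_of_mem_take (List.mem_of_mem_drop hx)
    have h3 : (PySem.Set.ofList cs).toFinset = cs.toFinset := by
      ext x
      rw [List.mem_toFinset, List.mem_toFinset, PySem.Set.mem_ofList]
    have h4 : cs.toFinset.card = (PySem.Set.ofList cs).length := by
      rw [← h3, List.toFinset_card_of_nodup (PySem.Set.nodup_ofList cs)]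
    have := Finset.card_le_card h2
    omega
  omega

theorem count_alt_eq_wins (S : String) (k : Int) :
    count_alt S k = PySem.Set.ofList (wins S.toList k) := by
  by_cases hk : k ≤ 0
  · rw [count_alt, if_pos (Or.inl hk), wins_nil_of_nonpos _ _ hk, PySem.Set.ofList_nil]
  · push_neg at hk
    set cs := S.toList with hcs
    set K := k.toNat with hKdef
    have hkK : k = (K : Int) := by omega
    have hK1 : 1 ≤ K := by omega
    by_cases hbig : PySem.Set.len (PySem.Set.ofList cs) < k
    · rw [count_alt, if_pos (Or.inr hbig),
        wins_nil_of_big cs k (by omega) (by rw [PySem.Set.len] at hbig; exact hbig),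
        PySem.Set.ofList_nil]
    · rw [count_alt, if_neg (by rintro (h | h) <;> [omega; exact hbig h])]
      have hM : ((cs.length : Int) - k + 1 - 0).toNat = cs.length + 1 - K := by omega
      have hpair := bstep2_pair S k (PySem.List.pyRange 0 ((cs.length : Int) - k + 1) 1)
        ([] : List String)
      rw [show (PySem.Set.empty, ([] : List String))
          = (([] : List String), ([] : List String)) from rfl, hpair]
      show (PySem.List.pyRange 0 ((cs.length : Int) - k + 1) 1).foldl (bstep S k) []
          = PySem.Set.ofList (wins cs k)
      rw [PySem.List.pyRange_one, hM, List.foldl_map]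
      have hstep : ∀ (res : List String), ∀ j ∈ List.range (cs.length + 1 - K),
          bstep S k res (0 + (j : Int))
            = if ((cs.drop j).take K).Nodup then
                PySem.Set.add res (String.ofList ((cs.drop j).take K)) else res := by
        intro res j hj
        have hj' : j < cs.length + 1 - K := List.mem_range.mp hj
        have hjK : j + K ≤ cs.length := by omega
        have hsubL : (PySem.Str.slice S (some (j : Int)) (some ((j : Int) + k))).toList
            = (cs.drop j).take K := by
          rw [PySem.Str.toList_slice, PySem.Chars.slice_eq_listSlice, hkK,
            PySem.List.slice_natCast_add]
        have hsubS : PySem.Str.slice S (some (j : Int)) (some ((j : Int) + k))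
            = String.ofList ((cs.drop j).take K) := by
          rw [← hsubL, String.ofList_toList]
        have hlen : ((cs.drop j).take K).length = K := by
          rw [List.length_take, List.length_drop]
          omega
        simp only [bstep, zero_add, hsubS, String.toList_ofList]
        by_cases hnd : ((cs.drop j).take K).Nodup
        · have hbeq : (PySem.Set.len (PySem.Set.ofList ((cs.drop j).take K)) == k) = true := by
            rw [beq_iff_eq, PySem.Set.len, (ofList_length_iff _).mpr hnd, hlen, hkK]
          rw [hbeq, Bool.true_and, if_pos hnd]
          simp only [PySem.Set.add, PySem.Set.contains]
          by_cases hc : res.contains (String.ofList ((cs.drop j).take K)) = true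
          · simp [hc]
          · simp [hc]
        · have hbeq : (PySem.Set.len (PySem.Set.ofList ((cs.drop j).take K)) == k) = false := by
            rw [beq_eq_false_iff_ne]
            intro heq
            apply hnd
            apply (ofList_length_iff _).mp
            have hKlen : (PySem.Set.ofList ((cs.drop j).take K)).length = K := by
              rw [PySem.Set.len] at heq
              omega
            rw [hKlen, hlen]
          rw [hbeq, Bool.false_and, if_neg hnd]
          simp
      rw [PySem.List.foldl_congr_mem _ _ _ _ hstep, foldl_add_if_set,
        PySem.Set.update_nil_left, hkK, wins_eq_bwins cs K hK1]

-- ===== VERDICT (by name: the statement is the Claim_ definition above) =====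
theorem count_spec : Claim_equal_count := by
  intro S k _
  unfold Spec_count
  rw [count_eq_wins, count_alt_eq_wins]
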